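-- pv_equiv track=rewrite | github.com/sarra1510/KPI | sprint_kpi_calculator.py | find_sheet_name
-- ===== SOURCE A (Python) =====
-- def find_sheet_name(available_sheets, expected_name, keywords, exclude_keywords=None):
--     """Find a sheet name using flexible matching."""
--     if expected_name in available_sheets:
--         return expected_name
--
--     normalized = {s: s.strip().lower().replace('\xa0', ' ') for s in available_sheets}
--
--     target = expected_name.lower()
--     for original, norm in normalized.items():
--         if norm == target:
--             return original
--
--     target_stripped = target.replace(" ", "")
--     for original, norm in normalized.items():
--         if norm.replace(" ", "") == target_stripped:
--             return original
--
--     for original, norm in normalized.items():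
--         if any(kw in norm for kw in keywords):
--             if exclude_keywords and any(ex in norm for ex in exclude_keywords):
--                 continue
--             return original
--
--     return None
-- ===== SOURCE B (Python) =====
-- def find_sheet_name(available_sheets, expected_name, keywords, exclude_keywords=None):
--     """Find a sheet name using flexible matching (single-pass priority ranking)."""
--     target = expected_name.lower()
--     target_stripped = target.replace(" ", "")
--     excl = exclude_keywords if exclude_keywords else []
--
--     def rank(sheet):
--         norm = sheet.strip().lower().replace('\xa0', ' ')
--         if sheet == expected_name:
--             return 0
--         if norm == target:
--             return 1
--         if norm.replace(" ", "") == target_stripped: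
--             return 2
--         if any(kw in norm for kw in keywords) and not any(ex in norm for ex in excl):
--             return 3
--         return None
--
--     best = None  # (rank, sheet); update only on strictly smaller rank
--     for sheet in available_sheets:
--         r = rank(sheet)
--         if r is not None and (best is None or r < best[0]):
--             best = (r, sheet)
--     return best[1] if best is not None else None
-- ===== Notes on version B (the rewrite author's own statement) =====
-- stated objective: alternative
-- what changed: A's four sequential scans (membership test, then three passes over a normalized dict) are replaced by a single pass over available_sheets that assigns each sheet a priority rank (0 exact, 1 normalized, 2 space-stripped, 3 keyword-and-not-excluded) and keeps the first sheet achieving the lowest rank.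
import Mathlib
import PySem

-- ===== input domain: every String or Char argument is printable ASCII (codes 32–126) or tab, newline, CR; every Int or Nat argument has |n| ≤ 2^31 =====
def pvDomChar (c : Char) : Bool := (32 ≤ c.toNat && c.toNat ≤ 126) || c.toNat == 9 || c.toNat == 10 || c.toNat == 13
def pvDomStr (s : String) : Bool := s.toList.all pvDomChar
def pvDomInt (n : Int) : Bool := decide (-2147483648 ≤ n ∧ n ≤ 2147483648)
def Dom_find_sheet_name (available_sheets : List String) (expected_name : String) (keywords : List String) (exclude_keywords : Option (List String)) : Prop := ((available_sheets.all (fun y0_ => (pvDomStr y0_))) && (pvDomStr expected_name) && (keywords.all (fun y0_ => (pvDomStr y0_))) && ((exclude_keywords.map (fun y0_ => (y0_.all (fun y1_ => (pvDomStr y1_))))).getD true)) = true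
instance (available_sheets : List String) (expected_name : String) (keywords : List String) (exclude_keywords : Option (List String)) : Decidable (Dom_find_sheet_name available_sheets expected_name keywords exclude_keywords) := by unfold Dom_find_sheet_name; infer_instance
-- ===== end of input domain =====

-- B replaces A's four sequential scans (membership test + three passes over the normalized dict)
-- by ONE pass computing a priority rank per sheet and keeping the first sheet of lowest rank
-- (objective: alternative decomposition; same asymptotic cost).

-- ===== PORT A =====
-- s.strip().lower().replace('\xa0', ' ')
def fsnNorm (s : String) : String :=
  PySem.Str.replace (PySem.Str.lower (PySem.Str.strip s)) "\u00A0" " "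

def find_sheet_name (available_sheets : List String) (expected_name : String) (keywords : List String) (exclude_keywords : Option (List String)) : Option String :=
  if expected_name ∈ available_sheets then some expected_name
  else
    let normalized : PySem.Dict String String :=
      available_sheets.foldl (fun d s => d.insert s (fsnNorm s)) PySem.Dict.empty
    let target := PySem.Str.lower expected_name
    match normalized.items.find? (fun p => p.2 == target) with
    | some p => some p.1
    | none =>
      let target_stripped := PySem.Str.replace target " " ""
      match normalized.items.find? (fun p => PySem.Str.replace p.2 " " "" == target_stripped) with
      | some p => some p.1
      | none =>
        -- 'if exclude_keywords and any(...)': truthiness of the optional list (None/[] are falsy)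
        match normalized.items.find? (fun p =>
            keywords.any (fun kw => PySem.Str.isIn kw p.2) &&
            !(match exclude_keywords with
              | none => false
              | some exs => decide (exs ≠ []) && exs.any (fun ex => PySem.Str.isIn ex p.2))) with
        | some p => some p.1
        | none => none

-- ===== PORT B =====
-- B's rank: 0 exact name, 1 normalized match, 2 space-stripped match, 3 keyword match (not excluded)
def fsnRank (expected_name target target_stripped : String) (keywords excl : List String) (sheet : String) : Option Nat :=
  let norm := fsnNorm sheet
  if sheet == expected_name then some 0
  else if norm == target then some 1
  else if PySem.Str.replace norm " " "" == target_stripped then some 2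
  else if keywords.any (fun kw => PySem.Str.isIn kw norm) && !(excl.any (fun ex => PySem.Str.isIn ex norm)) then some 3
  else none

-- loop body: keep the best (lowest-rank, earliest) candidate; update only on strictly smaller rank
def fsnBest (rank : String → Option Nat) (b : Option (Nat × String)) (sheet : String) : Option (Nat × String) :=
  match rank sheet, b with
  | none, b => b
  | some r, none => some (r, sheet)
  | some r, some (br, bs) => if r < br then some (r, sheet) else some (br, bs)

def find_sheet_name_alt (available_sheets : List String) (expected_name : String) (keywords : List String) (exclude_keywords : Option (List String)) : Option String :=
  let target := PySem.Str.lower expected_name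
  let target_stripped := PySem.Str.replace target " " ""
  let excl : List String := match exclude_keywords with | none => [] | some l => l
  let best := available_sheets.foldl
    (fsnBest (fsnRank expected_name target target_stripped keywords excl)) none
  match best with
  | some (_, s) => some s
  | none => none

-- ===== PRECONDITION & SPEC =====
def Spec_find_sheet_name (available_sheets : List String) (expected_name : String) (keywords : List String) (exclude_keywords : Option (List String)) (out : Option String) : Prop := out = find_sheet_name_alt available_sheets expected_name keywords exclude_keywords
instance (available_sheets : List String) (expected_name : String) (keywords : List String) (exclude_keywords : Option (List String)) (out : Option String) : Decidable (Spec_find_sheet_name available_sheets expected_name keywords exclude_keywords out) := by unfold Spec_find_sheet_name; infer_instance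

-- ===== CLAIM (what is proved, stated in full; the proofs are below) =====
def Claim_equal_find_sheet_name : Prop := ∀ (available_sheets : List String) (expected_name : String) (keywords : List String) (exclude_keywords : Option (List String)), Dom_find_sheet_name available_sheets expected_name keywords exclude_keywords → Spec_find_sheet_name available_sheets expected_name keywords exclude_keywords (find_sheet_name available_sheets expected_name keywords exclude_keywords)

-- ===== LEMMAS AND PROOFS =====

-- ---- generic find? facts ----
lemma find?_congr_mem {α : Type} (l : List α) (p q : α → Bool) (h : ∀ a ∈ l, p a = q a) :
    l.find? p = l.find? q := by
  induction l with
  | nil => rfl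
  | cons a t ih =>
    simp only [List.find?_cons, h a (List.mem_cons_self)]
    cases q a <;> simp [ih (fun a ha => h a (by simp [ha]))]

lemma find?_beq_of_mem (l : List String) (e : String) (h : e ∈ l) :
    l.find? (· == e) = some e := by
  induction l with
  | nil => cases h
  | cons a t ih =>
    by_cases ha : a = e
    · subst ha; simp
    · have : e ∈ t := by cases h with
        | head => exact absurd rfl ha
        | tail _ h' => exact h'
      simp [ha, ih this]

-- ---- A's dict-building fold: find? over its items = find? over the raw list ----
lemma items_insert_already (f : String → String) (d : PySem.Dict String String)
    (h : ∀ p ∈ d.items, p.2 = f p.1) (k : String) (hc : d.contains k = true) :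
    (d.insert k (f k)).items = d.items := by
  rw [PySem.Dict.items_insert_of_contains d (f k) hc]
  have : ∀ p ∈ d.items, (if (p.1 == k) = true then (k, f k) else p) = p := by
    intro p hp
    by_cases hk : p.1 = k
    · have h2 := h p hp
      subst hk
      simp [← h2]
    · simp [hk]
  rw [List.map_congr_left this]; exact List.map_id _

lemma mem_items_of_contains (f : String → String) (d : PySem.Dict String String)
    (h : ∀ p ∈ d.items, p.2 = f p.1) (k : String) (hc : d.contains k = true) :
    (k, f k) ∈ d.items := by
  rw [PySem.Dict.contains_eq_decide_mem_keys] at hc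
  have hk : k ∈ d.keys := by simpa using hc
  have : ∃ p ∈ d.items, p.1 = k := by
    simpa [PySem.Dict.keys] using hk
  obtain ⟨p, hp, hp1⟩ := this
  have h2 := h p hp
  have : p = (k, f k) := by
    cases p; simp_all
  rwa [this] at hp

lemma find?_fold_insert (f : String → String) (Q : String × String → Bool) :
    ∀ (xs : List String) (d : PySem.Dict String String),
      (∀ p ∈ d.items, p.2 = f p.1) →
      ((xs.foldl (fun d s => d.insert s (f s)) d).items.find? Q).map Prod.fst
        = ((d.items ++ xs.map (fun s => (s, f s))).find? Q).map Prod.fst := by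
  intro xs
  induction xs with
  | nil => intro d h; simp
  | cons s t ih =>
    intro d h
    simp only [List.foldl_cons, List.map_cons]
    by_cases hc : d.contains s = true
    · rw [ih (d.insert s (f s)) (by
        intro p hp
        rw [items_insert_already f d h s hc] at hp
        exact h p hp)]
      rw [items_insert_already f d h s hc]
      rw [List.find?_append, List.find?_append]
      cases hfd : d.items.find? Q with
      | some v => simp [Option.some_or]
      | none =>
        have hnQ : ¬ Q (s, f s) = true := by
          rw [List.find?_eq_none] at hfd
          exact hfd _ (mem_items_of_contains f d h s hc)
        simp only [Option.none_or, List.find?_cons]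
        cases hq : Q (s, f s) with
        | true => exact absurd hq hnQ
        | false => rfl
    · have hc' : d.contains s = false := by simpa using hc
      rw [ih (d.insert s (f s)) (by
        intro p hp
        rw [PySem.Dict.items_insert_of_not_contains d (f s) hc'] at hp
        rcases List.mem_append.mp hp with hp | hp
        · exact h p hp
        · simp at hp; subst hp; rfl)]
      rw [PySem.Dict.items_insert_of_not_contains d (f s) hc']
      rw [List.append_assoc]
      rfl

-- ---- B's fold characterized as a priority chain ----
def fsnFirstW (r : String → Option Nat) (xs : List String) (k : Nat) : Option String :=
  xs.find? (fun s => r s == some k)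

def fsnChain (r : String → Option Nat) (xs : List String) (n : Nat) : Option (Nat × String) :=
  (List.range n).foldl (fun o k => o.or ((fsnFirstW r xs k).map (fun s => (k, s)))) none

lemma chain_succ (r : String → Option Nat) (xs : List String) (n : Nat) :
    fsnChain r xs (n+1) = (fsnChain r xs n).or ((fsnFirstW r xs n).map (fun s => (n, s))) := by
  simp [fsnChain, List.range_succ]

lemma chain_nil (r : String → Option Nat) (n : Nat) : fsnChain r [] n = none := by
  induction n with
  | zero => rfl
  | succ n ih => rw [chain_succ, ih]; simp [fsnFirstW]

lemma firstW_cons (r : String → Option Nat) (s : String) (t : List String) (k : Nat) :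
    fsnFirstW r (s :: t) k = if r s == some k then some s else fsnFirstW r t k := by
  simp only [fsnFirstW, List.find?_cons]
  cases h : (r s == some k)
  · simp
  · simp

lemma chain_congr (r : String → Option Nat) (xs ys : List String) (n : Nat)
    (h : ∀ k < n, fsnFirstW r xs k = fsnFirstW r ys k) :
    fsnChain r xs n = fsnChain r ys n := by
  induction n with
  | zero => rfl
  | succ n ih =>
    rw [chain_succ, chain_succ, ih (fun k hk => h k (by omega)), h n (by omega)]

lemma chain_cons_none (r : String → Option Nat) (s : String) (t : List String) (n : Nat)
    (h : r s = none) : fsnChain r (s :: t) n = fsnChain r t n := by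
  apply chain_congr
  intro k _
  rw [firstW_cons, h]
  rfl

lemma chain_cons_ge (r : String → Option Nat) (s : String) (t : List String) (n m : Nat)
    (h : r s = some m) (hge : n ≤ m) : fsnChain r (s :: t) n = fsnChain r t n := by
  apply chain_congr
  intro k hk
  rw [firstW_cons, h]
  have hmk : ¬ (m = k) := by omega
  simp [hmk]

lemma chain_cons_lt (r : String → Option Nat) (s : String) (t : List String) (n m : Nat)
    (h : r s = some m) (hlt : m < n) :
    fsnChain r (s :: t) n = (fsnChain r t m).or (some (m, s)) := by
  induction n with
  | zero => omega
  | succ n ih =>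
    by_cases hm : m = n
    · subst hm
      rw [chain_succ, chain_cons_ge r s t m m h (le_refl m), firstW_cons, h]
      simp only [beq_self_eq_true, if_true, Option.map_some]
    · have hlt' : m < n := by omega
      rw [chain_succ, ih hlt']
      rw [Option.or_assoc]
      congr 1

lemma loop_some (r : String → Option Nat) :
    ∀ (xs : List String) (br : Nat) (bs : String),
      xs.foldl (fsnBest r) (some (br, bs)) = (fsnChain r xs br).or (some (br, bs)) := by
  intro xs
  induction xs with
  | nil => intro br bs; rw [chain_nil]; rfl
  | cons s t ih =>
    intro br bs
    simp only [List.foldl_cons]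
    cases hr : r s with
    | none =>
      show t.foldl (fsnBest r) (fsnBest r (some (br, bs)) s) = _
      rw [show fsnBest r (some (br, bs)) s = some (br, bs) by simp [fsnBest, hr]]
      rw [ih, chain_cons_none r s t br hr]
    | some m =>
      by_cases hlt : m < br
      · show t.foldl (fsnBest r) (fsnBest r (some (br, bs)) s) = _
        rw [show fsnBest r (some (br, bs)) s = some (m, s) by simp [fsnBest, hr, hlt]]
        rw [ih, chain_cons_lt r s t br m hr hlt, Option.or_assoc]
        congr 1
      · show t.foldl (fsnBest r) (fsnBest r (some (br, bs)) s) = _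
        rw [show fsnBest r (some (br, bs)) s = some (br, bs) by simp [fsnBest, hr, hlt]]
        rw [ih, chain_cons_ge r s t br m hr (by omega)]

lemma loop_none (r : String → Option Nat) (hb : ∀ s m, r s = some m → m < 4) :
    ∀ (xs : List String), xs.foldl (fsnBest r) none = fsnChain r xs 4 := by
  intro xs
  induction xs with
  | nil => rw [chain_nil]; rfl
  | cons s t ih =>
    simp only [List.foldl_cons]
    cases hr : r s with
    | none =>
      show t.foldl (fsnBest r) (fsnBest r none s) = _
      rw [show fsnBest r none s = none by simp [fsnBest, hr]]
      rw [ih, chain_cons_none r s t 4 hr]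
    | some m =>
      show t.foldl (fsnBest r) (fsnBest r none s) = _
      rw [show fsnBest r none s = some (m, s) by simp [fsnBest, hr]]
      rw [loop_some, chain_cons_lt r s t 4 m hr (hb s m hr)]

lemma find?_items_empty_fold (f : String → String) (Q : String × String → Bool) (xs : List String) :
    ((xs.foldl (fun d s => d.insert s (f s)) PySem.Dict.empty).items.find? Q).map Prod.fst
      = xs.find? (fun s => Q (s, f s)) := by
  rw [find?_fold_insert f Q xs PySem.Dict.empty (by intro p hp; simp [PySem.Dict.empty] at hp)]
  have : (PySem.Dict.empty : PySem.Dict String String).items = [] := rfl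
  rw [this, List.nil_append, List.find?_map]
  rw [Option.map_map]
  have : (Prod.fst ∘ fun s => (s, f s)) = id := rfl
  rw [this, Option.map_id]
  rfl

lemma matchOpt_eq_map_snd (o : Option (Nat × String)) :
    (match o with | some (_, s) => some s | none => none) = o.map Prod.snd := by
  cases o with
  | none => rfl
  | some p => cases p; rfl

lemma rank_lt4 (e t ts : String) (kws ex : List String) :
    ∀ s m, fsnRank e t ts kws ex s = some m → m < 4 := by
  intro s m h
  simp only [fsnRank] at h
  repeat' split at h
  all_goals first
    | (injection h with h; omega)
    | cases h

lemma rank_eq0 (e t ts : String) (kws ex : List String) (s : String) :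
    (fsnRank e t ts kws ex s == some 0) = (s == e) := by
  simp only [fsnRank]
  split_ifs <;> simp_all

lemma rank_eq1 (e t ts : String) (kws ex : List String) (s : String) (h0 : (s == e) = false) :
    (fsnRank e t ts kws ex s == some 1) = (fsnNorm s == t) := by
  simp only [fsnRank]
  split_ifs <;> simp_all

lemma rank_eq2 (e t ts : String) (kws ex : List String) (s : String) (h0 : (s == e) = false)
    (h1 : (fsnNorm s == t) = false) :
    (fsnRank e t ts kws ex s == some 2) = (PySem.Str.replace (fsnNorm s) " " "" == ts) := by
  simp only [fsnRank]
  split_ifs <;> simp_all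

lemma rank_eq3 (e t ts : String) (kws ex : List String) (s : String) (h0 : (s == e) = false)
    (h1 : (fsnNorm s == t) = false) (h2 : (PySem.Str.replace (fsnNorm s) " " "" == ts) = false) :
    (fsnRank e t ts kws ex s == some 3)
      = ((kws.any fun kw => PySem.Str.isIn kw (fsnNorm s)) && !(ex.any fun x => PySem.Str.isIn x (fsnNorm s))) := by
  simp only [fsnRank]
  (split_ifs <;> simp_all); try assumption

lemma chain_zero (r : String → Option Nat) (xs : List String) : fsnChain r xs 0 = none := rfl

lemma chain4_map_snd (r : String → Option Nat) (xs : List String) :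
    (fsnChain r xs 4).map Prod.snd
      = (((fsnFirstW r xs 0).or (fsnFirstW r xs 1)).or (fsnFirstW r xs 2)).or (fsnFirstW r xs 3) := by
  rw [show (4:Nat) = 3+1 from rfl, chain_succ, show (3:Nat) = 2+1 from rfl, chain_succ,
      show (2:Nat) = 1+1 from rfl, chain_succ, show (1:Nat) = 0+1 from rfl, chain_succ, chain_zero]
  simp [Option.map_or, Option.map_map]

-- proof-side abbreviations
def fsnExL (excl : Option (List String)) : List String :=
  match excl with | none => [] | some l => l

def fsnR (e : String) (kws : List String) (excl : Option (List String)) : String → Option Nat :=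
  fsnRank e (PySem.Str.lower e) (PySem.Str.replace (PySem.Str.lower e) " " "") kws (fsnExL excl)

-- A's body with the exclusion truthiness test abstracted into exA
def fsnA (xs : List String) (e : String) (kws : List String) (exA : String → Bool) : Option String :=
  if e ∈ xs then some e
  else
    let normalized : PySem.Dict String String :=
      xs.foldl (fun d s => d.insert s (fsnNorm s)) PySem.Dict.empty
    match normalized.items.find? (fun p => p.2 == (PySem.Str.lower e)) with
    | some p => some p.1
    | none =>
      match normalized.items.find? (fun p => PySem.Str.replace p.2 " " "" == (PySem.Str.replace (PySem.Str.lower e) " " "")) with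
      | some p => some p.1
      | none =>
        match normalized.items.find? (fun p => kws.any (fun kw => PySem.Str.isIn kw p.2) && !(exA p.2)) with
        | some p => some p.1
        | none => none

lemma fsnA_none (xs : List String) (e : String) (kws : List String) :
    find_sheet_name xs e kws none = fsnA xs e kws (fun _ => false) := rfl

lemma fsnA_some (xs : List String) (e : String) (kws : List String) (exs : List String) :
    find_sheet_name xs e kws (some exs)
      = fsnA xs e kws (fun v => decide (exs ≠ []) && exs.any (fun ex => PySem.Str.isIn ex v)) := rfl

lemma alt_eq_chain (xs : List String) (e : String) (kws : List String) (excl : Option (List String)) :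
    find_sheet_name_alt xs e kws excl
      = (((fsnFirstW (fsnR e kws excl) xs 0).or (fsnFirstW (fsnR e kws excl) xs 1)).or
          (fsnFirstW (fsnR e kws excl) xs 2)).or (fsnFirstW (fsnR e kws excl) xs 3) := by
  have h1 : find_sheet_name_alt xs e kws excl
      = (match xs.foldl (fsnBest (fsnR e kws excl)) none with | some (_, s) => some s | none => none) := rfl
  rw [h1, matchOpt_eq_map_snd,
      loop_none (fsnR e kws excl) (rank_lt4 e (PySem.Str.lower e) (PySem.Str.replace (PySem.Str.lower e) " " "") kws (fsnExL excl)),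
      chain4_map_snd]

lemma fsn_core (xs : List String) (e : String) (kws : List String) (exA : String → Bool) (exL : List String)
    (hx : ∀ v, exA v = exL.any (fun x => PySem.Str.isIn x v)) :
    fsnA xs e kws exA = ((((fsnFirstW (fsnRank e (PySem.Str.lower e) (PySem.Str.replace (PySem.Str.lower e) " " "") kws exL) xs 0).or (fsnFirstW (fsnRank e (PySem.Str.lower e) (PySem.Str.replace (PySem.Str.lower e) " " "") kws exL) xs 1)).or (fsnFirstW (fsnRank e (PySem.Str.lower e) (PySem.Str.replace (PySem.Str.lower e) " " "") kws exL) xs 2)).or (fsnFirstW (fsnRank e (PySem.Str.lower e) (PySem.Str.replace (PySem.Str.lower e) " " "") kws exL) xs 3)) := by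
  by_cases hmem : e ∈ xs
  · have hfw0 : fsnFirstW (fsnRank e (PySem.Str.lower e) (PySem.Str.replace (PySem.Str.lower e) " " "") kws exL) xs 0 = some e := by
      rw [fsnFirstW, find?_congr_mem xs (fun s => (fsnRank e (PySem.Str.lower e) (PySem.Str.replace (PySem.Str.lower e) " " "") kws exL) s == some 0) (· == e)
        (fun a _ => rank_eq0 e (PySem.Str.lower e) (PySem.Str.replace (PySem.Str.lower e) " " "") kws exL a), find?_beq_of_mem xs e hmem]
    rw [hfw0]
    simp only [Option.some_or]
    unfold fsnA
    rw [if_pos hmem]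
  · have h0all : ∀ a ∈ xs, (a == e) = false := by
      intro a ha
      simp only [beq_eq_false_iff_ne, ne_eq]
      rintro rfl
      exact hmem ha
    have hfw0 : fsnFirstW (fsnRank e (PySem.Str.lower e) (PySem.Str.replace (PySem.Str.lower e) " " "") kws exL) xs 0 = none := by
      rw [fsnFirstW, find?_congr_mem xs (fun s => (fsnRank e (PySem.Str.lower e) (PySem.Str.replace (PySem.Str.lower e) " " "") kws exL) s == some 0) (· == e)
        (fun a _ => rank_eq0 e (PySem.Str.lower e) (PySem.Str.replace (PySem.Str.lower e) " " "") kws exL a)]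
      exact List.find?_eq_none.mpr (fun a ha => by rw [h0all a ha]; exact Bool.false_ne_true)
    unfold fsnA
    rw [if_neg hmem]
    have hA1 := find?_items_empty_fold fsnNorm (fun p => p.2 == (PySem.Str.lower e)) xs
    cases h1 : ((xs.foldl (fun d s => d.insert s (fsnNorm s)) PySem.Dict.empty).items.find? (fun p => p.2 == (PySem.Str.lower e))) with
    | some p =>
      rw [h1] at hA1
      have hq1 : xs.find? (fun s => fsnNorm s == (PySem.Str.lower e)) = some p.1 := by rw [← hA1]; rfl
      have hfw1 : fsnFirstW (fsnRank e (PySem.Str.lower e) (PySem.Str.replace (PySem.Str.lower e) " " "") kws exL) xs 1 = some p.1 := by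
        rw [fsnFirstW, find?_congr_mem xs (fun s => (fsnRank e (PySem.Str.lower e) (PySem.Str.replace (PySem.Str.lower e) " " "") kws exL) s == some 1) (fun s => fsnNorm s == (PySem.Str.lower e))
          (fun a ha => rank_eq1 e (PySem.Str.lower e) (PySem.Str.replace (PySem.Str.lower e) " " "") kws exL a (h0all a ha)), hq1]
      simp only [h1, hfw0, hfw1, Option.none_or, Option.some_or]
    | none =>
      rw [h1] at hA1
      have hq1 : xs.find? (fun s => fsnNorm s == (PySem.Str.lower e)) = none := by rw [← hA1]; rfl
      have h1all : ∀ a ∈ xs, (fsnNorm a == (PySem.Str.lower e)) = false := by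
        intro a ha
        have h := List.find?_eq_none.mp hq1 a ha
        simpa using h
      have hfw1 : fsnFirstW (fsnRank e (PySem.Str.lower e) (PySem.Str.replace (PySem.Str.lower e) " " "") kws exL) xs 1 = none := by
        rw [fsnFirstW, find?_congr_mem xs (fun s => (fsnRank e (PySem.Str.lower e) (PySem.Str.replace (PySem.Str.lower e) " " "") kws exL) s == some 1) (fun s => fsnNorm s == (PySem.Str.lower e))
          (fun a ha => rank_eq1 e (PySem.Str.lower e) (PySem.Str.replace (PySem.Str.lower e) " " "") kws exL a (h0all a ha)), hq1]
      have hA2 := find?_items_empty_fold fsnNorm (fun p => PySem.Str.replace p.2 " " "" == (PySem.Str.replace (PySem.Str.lower e) " " "")) xs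
      cases h2 : ((xs.foldl (fun d s => d.insert s (fsnNorm s)) PySem.Dict.empty).items.find? (fun p => PySem.Str.replace p.2 " " "" == (PySem.Str.replace (PySem.Str.lower e) " " ""))) with
      | some p =>
        rw [h2] at hA2
        have hq2 : xs.find? (fun s => PySem.Str.replace (fsnNorm s) " " "" == (PySem.Str.replace (PySem.Str.lower e) " " "")) = some p.1 := by rw [← hA2]; rfl
        have hfw2 : fsnFirstW (fsnRank e (PySem.Str.lower e) (PySem.Str.replace (PySem.Str.lower e) " " "") kws exL) xs 2 = some p.1 := by
          rw [fsnFirstW, find?_congr_mem xs (fun s => (fsnRank e (PySem.Str.lower e) (PySem.Str.replace (PySem.Str.lower e) " " "") kws exL) s == some 2) (fun s => PySem.Str.replace (fsnNorm s) " " "" == (PySem.Str.replace (PySem.Str.lower e) " " ""))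
            (fun a ha => rank_eq2 e (PySem.Str.lower e) (PySem.Str.replace (PySem.Str.lower e) " " "") kws exL a (h0all a ha) (h1all a ha)), hq2]
        simp only [h1, h2, hfw0, hfw1, hfw2, Option.none_or, Option.some_or]
      | none =>
        rw [h2] at hA2
        have hq2 : xs.find? (fun s => PySem.Str.replace (fsnNorm s) " " "" == (PySem.Str.replace (PySem.Str.lower e) " " "")) = none := by rw [← hA2]; rfl
        have h2all : ∀ a ∈ xs, (PySem.Str.replace (fsnNorm a) " " "" == (PySem.Str.replace (PySem.Str.lower e) " " "")) = false := by
          intro a ha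
          have h := List.find?_eq_none.mp hq2 a ha
          simpa using h
        have hfw2 : fsnFirstW (fsnRank e (PySem.Str.lower e) (PySem.Str.replace (PySem.Str.lower e) " " "") kws exL) xs 2 = none := by
          rw [fsnFirstW, find?_congr_mem xs (fun s => (fsnRank e (PySem.Str.lower e) (PySem.Str.replace (PySem.Str.lower e) " " "") kws exL) s == some 2) (fun s => PySem.Str.replace (fsnNorm s) " " "" == (PySem.Str.replace (PySem.Str.lower e) " " ""))
            (fun a ha => rank_eq2 e (PySem.Str.lower e) (PySem.Str.replace (PySem.Str.lower e) " " "") kws exL a (h0all a ha) (h1all a ha)), hq2]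
        have hptw3 : ∀ a ∈ xs, ((fsnRank e (PySem.Str.lower e) (PySem.Str.replace (PySem.Str.lower e) " " "") kws exL) a == some 3) = (kws.any (fun kw => PySem.Str.isIn kw (fsnNorm a)) && !(exA (fsnNorm a))) := by
          intro a ha
          rw [rank_eq3 e (PySem.Str.lower e) (PySem.Str.replace (PySem.Str.lower e) " " "") kws exL a (h0all a ha) (h1all a ha) (h2all a ha), hx (fsnNorm a)]
        have hA3 := find?_items_empty_fold fsnNorm (fun p => kws.any (fun kw => PySem.Str.isIn kw p.2) && !(exA p.2)) xs
        cases h3 : ((xs.foldl (fun d s => d.insert s (fsnNorm s)) PySem.Dict.empty).items.find? (fun p => kws.any (fun kw => PySem.Str.isIn kw p.2) && !(exA p.2))) with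
        | some p =>
          rw [h3] at hA3
          have hq3 : xs.find? (fun s => kws.any (fun kw => PySem.Str.isIn kw (fsnNorm s)) && !(exA (fsnNorm s))) = some p.1 := by rw [← hA3]; rfl
          have hfw3 : fsnFirstW (fsnRank e (PySem.Str.lower e) (PySem.Str.replace (PySem.Str.lower e) " " "") kws exL) xs 3 = some p.1 := by
            rw [fsnFirstW, find?_congr_mem xs (fun s => (fsnRank e (PySem.Str.lower e) (PySem.Str.replace (PySem.Str.lower e) " " "") kws exL) s == some 3) (fun s => kws.any (fun kw => PySem.Str.isIn kw (fsnNorm s)) && !(exA (fsnNorm s))) hptw3, hq3]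
          simp only [h1, h2, h3, hfw0, hfw1, hfw2, hfw3, Option.none_or]
        | none =>
          rw [h3] at hA3
          have hq3 : xs.find? (fun s => kws.any (fun kw => PySem.Str.isIn kw (fsnNorm s)) && !(exA (fsnNorm s))) = none := by rw [← hA3]; rfl
          have hfw3 : fsnFirstW (fsnRank e (PySem.Str.lower e) (PySem.Str.replace (PySem.Str.lower e) " " "") kws exL) xs 3 = none := by
            rw [fsnFirstW, find?_congr_mem xs (fun s => (fsnRank e (PySem.Str.lower e) (PySem.Str.replace (PySem.Str.lower e) " " "") kws exL) s == some 3) (fun s => kws.any (fun kw => PySem.Str.isIn kw (fsnNorm s)) && !(exA (fsnNorm s))) hptw3, hq3]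
          simp only [h1, h2, h3, hfw0, hfw1, hfw2, hfw3, Option.none_or]

-- ===== VERDICT (by name: the statement is the Claim_ definition above) =====
theorem find_sheet_name_spec : Claim_equal_find_sheet_name := by
  intro xs e kws excl _dom
  clear _dom
  unfold Spec_find_sheet_name
  rw [alt_eq_chain]
  cases excl with
  | none =>
    rw [fsnA_none]
    exact fsn_core xs e kws (fun _ => false) (fsnExL none) (fun v => by simp [fsnExL])
  | some exs =>
    rw [fsnA_some]
    exact fsn_core xs e kws (fun v => decide (exs ≠ []) && exs.any (fun ex => PySem.Str.isIn ex v))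
      (fsnExL (some exs)) (fun v => by cases exs <;> simp [fsnExL])
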